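-- pv_equiv track=rewrite | github.com/k-harada/AtCoder | ABC151/C.py | solve
-- ===== SOURCE A (Python) =====
-- def solve(n, m, p_list, s_list):
--
--     res_ac = 0
--     res_wa = 0
--
--     ac_dict = dict()
--     wa_dict = dict()
--
--     for i in range(m):
--         p = p_list[i]
--         s = s_list[i]
--
--         if s == "AC":
--             if p not in ac_dict.keys():
--                 ac_dict[p] = 1
--                 res_ac += 1
--                 if p in wa_dict.keys():
--                     res_wa += wa_dict[p]
--         else:
--             if p not in wa_dict.keys():
--                 wa_dict[p] = 1
--             else:
--                 wa_dict[p] += 1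
--     return str(res_ac) + " " + str(res_wa)
-- ===== SOURCE B (Python) =====
-- def solve(n, m, p_list, s_list):
--     groups = {}
--     for i in range(m):
--         groups.setdefault(p_list[i], []).append(s_list[i])
--     ac = 0
--     wa = 0
--     for statuses in groups.values():
--         if "AC" in statuses:
--             ac += 1
--             wa += statuses.index("AC")
--     return str(ac) + " " + str(wa)
-- ===== Notes on version B (the rewrite author's own statement) =====
-- stated objective: alternative
-- what changed: A's single interleaved scan maintaining two dicts (accepted-flags and penalty counters) is replaced by a two-phase decomposition: first group each problem's statuses into an ordered dict of lists, then judge each group independently (AC membership + index of the first AC as the penalty).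
import Mathlib
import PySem

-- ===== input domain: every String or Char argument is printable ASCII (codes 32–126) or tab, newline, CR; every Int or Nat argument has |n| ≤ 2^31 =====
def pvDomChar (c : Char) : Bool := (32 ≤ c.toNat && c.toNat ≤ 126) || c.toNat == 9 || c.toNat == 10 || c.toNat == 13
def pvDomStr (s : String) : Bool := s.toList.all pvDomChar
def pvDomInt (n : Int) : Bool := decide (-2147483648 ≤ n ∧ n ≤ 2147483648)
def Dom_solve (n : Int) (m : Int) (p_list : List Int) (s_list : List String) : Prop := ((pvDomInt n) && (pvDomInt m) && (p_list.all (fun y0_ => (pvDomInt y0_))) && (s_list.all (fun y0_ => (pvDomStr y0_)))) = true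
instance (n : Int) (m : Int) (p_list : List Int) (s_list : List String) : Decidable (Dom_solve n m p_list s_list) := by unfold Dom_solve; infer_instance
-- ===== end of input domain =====

-- B replaces A's single interleaved scan with two dicts by a grouping pass (problem → its ordered
-- statuses) followed by a per-group judgement; an alternative decomposition of the same O(m) task.

-- ===== PORT A =====
-- loop body of A, as a helper; state = (res_ac, res_wa, ac_dict, wa_dict)
def solveStep (st : Int × Int × PySem.Dict Int Int × PySem.Dict Int Int) (p : Int) (s : String) :
    Int × Int × PySem.Dict Int Int × PySem.Dict Int Int :=
  if s == "AC" then
    if !st.2.2.1.contains p then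
      if st.2.2.2.contains p then
        -- wa_dict[p] under the contains-guard is exactly getD p 0
        (st.1 + 1, st.2.1 + st.2.2.2.getD p 0, st.2.2.1.insert p 1, st.2.2.2)
      else
        (st.1 + 1, st.2.1, st.2.2.1.insert p 1, st.2.2.2)
    else st
  else
    if !st.2.2.2.contains p then
      (st.1, st.2.1, st.2.2.1, st.2.2.2.insert p 1)
    else
      -- wa_dict[p] += 1 on a present key is modify with any default
      (st.1, st.2.1, st.2.2.1, st.2.2.2.modify p 0 (· + 1))

-- p_list[i] / s_list[i] are ported as pyGetD: exact under Pre_solve (0 ≤ i < m ≤ lengths)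
def solve (n : Int) (m : Int) (p_list : List Int) (s_list : List String) : String :=
  let st := (PySem.List.pyRange 0 m 1).foldl
    (fun st i => solveStep st (PySem.List.pyGetD p_list i 0) (PySem.List.pyGetD s_list i ""))
    (0, 0, PySem.Dict.empty, PySem.Dict.empty)
  PySem.Int.toStr st.1 ++ " " ++ PySem.Int.toStr st.2.1

-- ===== PORT B =====
def solve_alt (n : Int) (m : Int) (p_list : List Int) (s_list : List String) : String :=
  -- first pass: groups.setdefault(p_list[i], []).append(s_list[i])
  let groups := (PySem.List.pyRange 0 m 1).foldl
    (fun (d : PySem.Dict Int (List String)) i =>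
      d.modify (PySem.List.pyGetD p_list i 0) [] (· ++ [PySem.List.pyGetD s_list i ""]))
    PySem.Dict.empty
  -- second pass over groups.values(); statuses.index("AC") is guarded by the membership test
  let res := groups.values.foldl
    (fun (r : Int × Int) sts =>
      if sts.contains "AC" then (r.1 + 1, r.2 + (((PySem.List.index? sts "AC").getD 0 : Nat) : Int))
      else r)
    (0, 0)
  PySem.Int.toStr res.1 ++ " " ++ PySem.Int.toStr res.2

-- ===== PRECONDITION & SPEC =====
-- Pre_ excludes exactly the inputs where Python A raises IndexError: m larger than a list's length.
def Pre_solve (n : Int) (m : Int) (p_list : List Int) (s_list : List String) : Prop :=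
  m ≤ (p_list.length : Int) ∧ m ≤ (s_list.length : Int)
instance (n : Int) (m : Int) (p_list : List Int) (s_list : List String) : Decidable (Pre_solve n m p_list s_list) := by unfold Pre_solve; infer_instance
def pvWitness_solve : Int × Int × List Int × List String := (3, 4, [1, 2, 1, 2], ["WA", "AC", "AC", "WA"])

def Spec_solve (n : Int) (m : Int) (p_list : List Int) (s_list : List String) (out : String) : Prop := out = solve_alt n m p_list s_list
instance (n : Int) (m : Int) (p_list : List Int) (s_list : List String) (out : String) : Decidable (Spec_solve n m p_list s_list out) := by unfold Spec_solve; infer_instance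

-- ===== CLAIM (what is proved, stated in full; the proofs are below) =====
def Claim_equal_solve : Prop := ∀ (n : Int) (m : Int) (p_list : List Int) (s_list : List String), Dom_solve n m p_list s_list → Pre_solve n m p_list s_list → Spec_solve n m p_list s_list (solve n m p_list s_list)

-- ===== LEMMAS AND PROOFS =====

-- the statuses submitted for problem c, in order
def statOf (L : List (Int × String)) (c : Int) : List String :=
  (L.filter (fun q => q.1 == c)).map (·.2)
def hasAC (L : List (Int × String)) (c : Int) : Bool := (statOf L c).contains "AC"
def penOf (L : List (Int × String)) (c : Int) : Int :=
  (((PySem.List.index? (statOf L c) "AC").getD 0 : Nat) : Int)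
def cntOf (L : List (Int × String)) (c : Int) : Int :=
  ((statOf L c).countP (fun s => !(s == "AC")) : Int)
def keysOf (L : List (Int × String)) : List Int := PySem.List.dedup (L.map (·.1))
def refAC (L : List (Int × String)) : Int :=
  ((keysOf L).map (fun c => if hasAC L c then (1 : Int) else 0)).sum
def refWA (L : List (Int × String)) : Int :=
  ((keysOf L).map (fun c => if hasAC L c then penOf L c else 0)).sum

lemma statOf_append (L : List (Int × String)) (x : Int × String) (c : Int) :
    statOf (L ++ [x]) c = statOf L c ++ if x.1 == c then [x.2] else [] := by
  cases hx : x.1 == c <;> simp [statOf, List.filter_append, hx]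

lemma dedup_append_singleton {α : Type} [BEq α] [LawfulBEq α] (l : List α) (p : α) :
    PySem.List.dedup (l ++ [p]) =
      if p ∈ l then PySem.List.dedup l else PySem.List.dedup l ++ [p] := by
  simp only [PySem.List.dedup_eq_ofList, PySem.Set.ofList_eq_foldl, List.foldl_append]
  simp [PySem.Set.add, ← PySem.Set.ofList_eq_foldl, PySem.Set.mem_ofList]

lemma keysOf_append (L : List (Int × String)) (x : Int × String) :
    keysOf (L ++ [x]) =
      if x.1 ∈ L.map (·.1) then keysOf L else keysOf L ++ [x.1] := by
  simp only [keysOf, List.map_append, List.map_cons, List.map_nil]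
  exact dedup_append_singleton _ _

lemma mem_keysOf (L : List (Int × String)) (c : Int) : c ∈ keysOf L ↔ c ∈ L.map (·.1) := by
  simp [keysOf]

lemma nodup_keysOf (L : List (Int × String)) : (keysOf L).Nodup :=
  PySem.List.nodup_dedup _

lemma statOf_eq_nil_of_not_mem (L : List (Int × String)) (c : Int) (h : c ∉ L.map (·.1)) :
    statOf L c = [] := by
  simp only [statOf, List.map_eq_nil_iff, List.filter_eq_nil_iff]
  intro q hq hqc
  exact h (List.mem_map.mpr ⟨q, hq, by simpa using hqc⟩)

lemma sum_map_update {α : Type} [DecidableEq α] (l : List α) (f g : α → Int) (p : α)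
    (hl : l.Nodup) (hp : p ∈ l) (h : ∀ q ∈ l, q ≠ p → f q = g q) :
    (l.map g).sum = (l.map f).sum + (g p - f p) := by
  induction l with
  | nil => cases hp
  | cons a t ih =>
    rcases List.mem_cons.mp hp with rfl | hpt
    · have he : ∀ q ∈ t, f q = g q := fun q hq =>
        h q (List.mem_cons_of_mem _ hq) (fun e => (List.nodup_cons.mp hl).1 (e ▸ hq))
      simp [List.map_congr_left fun q hq => (he q hq).symm]
      ring
    · have ha : a ≠ p := fun e => (List.nodup_cons.mp hl).1 (e ▸ hpt)
      have := ih (List.nodup_cons.mp hl).2 hpt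
        (fun q hq hqp => h q (List.mem_cons_of_mem _ hq) hqp)
      simp [this, h a (List.mem_cons_self) ha]
      ring

lemma statOf_append_self (L : List (Int × String)) (p : Int) (s : String) :
    statOf (L ++ [(p, s)]) p = statOf L p ++ [s] := by
  simp [statOf_append]

lemma statOf_append_ne (L : List (Int × String)) (p c : Int) (s : String) (h : c ≠ p) :
    statOf (L ++ [(p, s)]) c = statOf L c := by
  have hb : (p == c) = false := by simpa using (Ne.symm h)
  simp [statOf_append, hb]

lemma hasAC_append_self (L : List (Int × String)) (p : Int) (s : String) :
    hasAC (L ++ [(p, s)]) p = (hasAC L p || (s == "AC")) := by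
  simp only [hasAC, statOf_append_self, List.contains_append, List.contains_cons,
    List.contains_nil]
  cases hs : s == "AC" <;> simp [BEq.comm, hs]

lemma hasAC_append_ne (L : List (Int × String)) (p c : Int) (s : String) (h : c ≠ p) :
    hasAC (L ++ [(p, s)]) c = hasAC L c := by
  rw [hasAC, statOf_append_ne L p c s h, hasAC]

lemma cntOf_append_self (L : List (Int × String)) (p : Int) (s : String) :
    cntOf (L ++ [(p, s)]) p = cntOf L p + (if s == "AC" then 0 else 1) := by
  cases hs : s == "AC" <;> simp [cntOf, statOf_append_self, List.countP_append, hs]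

lemma cntOf_append_ne (L : List (Int × String)) (p c : Int) (s : String) (h : c ≠ p) :
    cntOf (L ++ [(p, s)]) c = cntOf L c := by
  rw [cntOf, statOf_append_ne L p c s h, cntOf]

lemma penOf_append_ne (L : List (Int × String)) (p c : Int) (s : String) (h : c ≠ p) :
    penOf (L ++ [(p, s)]) c = penOf L c := by
  rw [penOf, statOf_append_ne L p c s h, penOf]

lemma penOf_append_of_hasAC (L : List (Int × String)) (p : Int) (s : String)
    (h : hasAC L p = true) : penOf (L ++ [(p, s)]) p = penOf L p := by
  rw [penOf, penOf, statOf_append_self,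
    PySem.List.index?_append_of_mem _ (by simpa [hasAC] using h)]

lemma penOf_append_AC_new (L : List (Int × String)) (p : Int)
    (h : hasAC L p = false) : penOf (L ++ [(p, "AC")]) p = cntOf L p := by
  have hmem : "AC" ∉ statOf L p := by simpa [hasAC] using h
  have hidx := PySem.List.index?_append_singleton_self (l := statOf L p) (c := "AC") hmem
  rw [penOf, statOf_append_self, hidx]
  rw [cntOf, List.countP_eq_length.mpr (fun t ht => by simp; exact fun e => hmem (e ▸ ht))]
  simp

lemma cntOf_nonneg (L : List (Int × String)) (c : Int) : 0 ≤ cntOf L c := Int.natCast_nonneg _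

lemma hasAC_of_not_mem (L : List (Int × String)) (p : Int) (h : p ∉ L.map (·.1)) :
    hasAC L p = false := by
  simp [hasAC, statOf_eq_nil_of_not_mem L p h]

lemma refs_append_unchanged (L : List (Int × String)) (p : Int) (s : String)
    (h1 : ∀ c, hasAC (L ++ [(p, s)]) c = hasAC L c)
    (h2 : ∀ c, hasAC L c = true → penOf (L ++ [(p, s)]) c = penOf L c) :
    refAC (L ++ [(p, s)]) = refAC L ∧ refWA (L ++ [(p, s)]) = refWA L := by
  have hcontrib : ∀ c,
      (if hasAC (L ++ [(p, s)]) c then penOf (L ++ [(p, s)]) c else 0)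
        = (if hasAC L c then penOf L c else 0) := by
    intro c
    rw [h1 c]
    cases hA : hasAC L c <;> simp [hA, h2 c]
  by_cases hmem : p ∈ L.map (·.1)
  · rw [refAC, refWA, refAC, refWA, keysOf_append, if_pos hmem]
    exact ⟨by rw [List.map_congr_left (fun c _ => by rw [h1 c])],
           by rw [List.map_congr_left (fun c _ => hcontrib c)]⟩
  · have hAp : hasAC (L ++ [(p, s)]) p = false := by
      rw [h1 p]; exact hasAC_of_not_mem L p hmem
    rw [refAC, refWA, refAC, refWA, keysOf_append, if_neg hmem]
    simp only [List.map_append, List.map_cons, List.map_nil, List.sum_append, hAp]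
    exact ⟨by rw [List.map_congr_left (fun c _ => by rw [h1 c])]; simp,
           by rw [List.map_congr_left (fun c _ => hcontrib c)]; simp⟩

lemma refs_append_AC_new (L : List (Int × String)) (p : Int) (h : hasAC L p = false) :
    refAC (L ++ [(p, "AC")]) = refAC L + 1 ∧
      refWA (L ++ [(p, "AC")]) = refWA L + cntOf L p := by
  have hAp : hasAC (L ++ [(p, "AC")]) p = true := by simp [hasAC_append_self, h]
  have hpen : penOf (L ++ [(p, "AC")]) p = cntOf L p := penOf_append_AC_new L p h
  have e1 : ∀ q, q ≠ p →
      (if hasAC (L ++ [(p, "AC")]) q = true then (1 : Int) else 0)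
        = (if hasAC L q = true then (1 : Int) else 0) := fun q hq => by
    rw [hasAC_append_ne L p q "AC" hq]
  have e2 : ∀ q, q ≠ p →
      (if hasAC (L ++ [(p, "AC")]) q = true then penOf (L ++ [(p, "AC")]) q else 0)
        = (if hasAC L q = true then penOf L q else 0) := fun q hq => by
    cases hA : hasAC L q <;>
      simp [hasAC_append_ne L p q "AC" hq, hA, penOf_append_ne L p q "AC" hq]
  by_cases hmem : p ∈ List.map (·.1) L
  · have hk : p ∈ keysOf L := (mem_keysOf L p).mpr hmem
    constructor
    · rw [refAC, refAC, keysOf_append, if_pos hmem,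
        sum_map_update (keysOf L) (fun c => if hasAC L c then (1 : Int) else 0)
          (fun c => if hasAC (L ++ [(p, "AC")]) c then (1 : Int) else 0) p
          (nodup_keysOf L) hk (fun q _ hq => (e1 q hq).symm), hAp, h]
      simp
    · rw [refWA, refWA, keysOf_append, if_pos hmem,
        sum_map_update (keysOf L) (fun c => if hasAC L c then penOf L c else 0)
          (fun c => if hasAC (L ++ [(p, "AC")]) c then penOf (L ++ [(p, "AC")]) c else 0) p
          (nodup_keysOf L) hk (fun q _ hq => (e2 q hq).symm), hAp, h, hpen]
      simp
  · have hne : ∀ c ∈ keysOf L, c ≠ p := fun c hc e =>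
      hmem (e ▸ (mem_keysOf L c).mp hc)
    rw [refAC, refWA, refAC, refWA, keysOf_append, if_neg hmem]
    simp only [List.map_append, List.map_cons, List.map_nil, List.sum_append, hAp, hpen]
    constructor
    · rw [List.map_congr_left (fun c hc => e1 c (hne c hc))]
      simp [add_comm]
    · rw [List.map_congr_left (fun c hc => e2 c (hne c hc))]
      simp [add_comm]

-- the A-side loop state, and its invariant by snoc induction over the (problem, status) pairs
def stateA (L : List (Int × String)) : Int × Int × PySem.Dict Int Int × PySem.Dict Int Int :=
  L.foldl (fun st pr => solveStep st pr.1 pr.2)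
    ((0 : Int), (0 : Int), (PySem.Dict.empty : PySem.Dict Int Int),
      (PySem.Dict.empty : PySem.Dict Int Int))

lemma stateA_append (L : List (Int × String)) (x : Int × String) :
    stateA (L ++ [x]) = solveStep (stateA L) x.1 x.2 := by
  simp [stateA]

lemma A_fold_inv (L : List (Int × String)) :
    (stateA L).1 = refAC L ∧ (stateA L).2.1 = refWA L ∧
      (∀ c, (stateA L).2.2.1.contains c = hasAC L c) ∧
      (∀ c, (stateA L).2.2.2.contains c = decide (cntOf L c ≠ 0)) ∧
      (∀ c, (stateA L).2.2.2.getD c 0 = cntOf L c) := by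
  induction L using List.reverseRecOn with
  | nil =>
    refine ⟨rfl, rfl, fun c => ?_, fun c => ?_, fun c => ?_⟩ <;>
      simp [stateA, hasAC, cntOf, statOf, PySem.Dict.contains_empty, PySem.Dict.getD_empty]
  | append_singleton L x ih =>
    obtain ⟨p, s⟩ := x
    obtain ⟨hac, hwa, hcad, hcwd, hgwd⟩ := ih
    rw [stateA_append]
    by_cases hs : s = "AC"
    · subst hs
      cases hA : hasAC L p
      · -- first AC for problem p
        have h1p : hasAC (L ++ [(p, "AC")]) p = true := by
          simp [hasAC_append_self, hA]
        have hcnt : ∀ c, cntOf (L ++ [(p, "AC")]) c = cntOf L c := by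
          intro c
          by_cases hc : c = p
          · subst hc; simp [cntOf_append_self]
          · exact cntOf_append_ne L p c "AC" hc
        obtain ⟨r1, r2⟩ := refs_append_AC_new L p hA
        have hcontains : ∀ c,
            ((stateA L).2.2.1.insert p 1).contains c = hasAC (L ++ [(p, "AC")]) c := by
          intro c
          rw [PySem.Dict.contains_insert]
          by_cases hc : c = p
          · subst hc; simp [h1p]
          · have : (c == p) = false := by simpa using hc
            rw [this, hasAC_append_ne L p c "AC" hc, ← hcad c]
            simp
        by_cases hc0 : cntOf L p = 0
        · have hstep : solveStep (stateA L) p "AC"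
              = ((stateA L).1 + 1, (stateA L).2.1, (stateA L).2.2.1.insert p 1,
                 (stateA L).2.2.2) := by
            simp [solveStep, hcad p, hA, hcwd p, hc0]
          rw [hstep]
          exact ⟨by rw [r1, hac], by rw [r2, hwa, hc0, add_zero], hcontains,
            fun c => by rw [hcwd c, hcnt c], fun c => by rw [hgwd c, hcnt c]⟩
        · have hstep : solveStep (stateA L) p "AC"
              = ((stateA L).1 + 1, (stateA L).2.1 + (stateA L).2.2.2.getD p 0,
                 (stateA L).2.2.1.insert p 1, (stateA L).2.2.2) := by
            simp [solveStep, hcad p, hA, hcwd p, hc0]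
          rw [hstep]
          exact ⟨by rw [r1, hac], by rw [r2, hwa, hgwd p], hcontains,
            fun c => by rw [hcwd c, hcnt c], fun c => by rw [hgwd c, hcnt c]⟩
      · -- p already solved: the state does not move
        have hstep : solveStep (stateA L) p "AC" = stateA L := by
          simp [solveStep, hcad p, hA]
        rw [hstep]
        have h1 : ∀ c, hasAC (L ++ [(p, "AC")]) c = hasAC L c := by
          intro c
          by_cases hc : c = p
          · subst hc; simp [hasAC_append_self, hA]
          · exact hasAC_append_ne L p c "AC" hc
        have h2 : ∀ c, hasAC L c = true → penOf (L ++ [(p, "AC")]) c = penOf L c := by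
          intro c hAc
          by_cases hc : c = p
          · subst hc; exact penOf_append_of_hasAC L c "AC" hAc
          · exact penOf_append_ne L p c "AC" hc
        obtain ⟨r1, r2⟩ := refs_append_unchanged L p "AC" h1 h2
        have hcnt : ∀ c, cntOf (L ++ [(p, "AC")]) c = cntOf L c := by
          intro c
          by_cases hc : c = p
          · subst hc; simp [cntOf_append_self]
          · exact cntOf_append_ne L p c "AC" hc
        exact ⟨by rw [r1, hac], by rw [r2, hwa], fun c => by rw [hcad c, h1 c],
          fun c => by rw [hcwd c, hcnt c], fun c => by rw [hgwd c, hcnt c]⟩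
    · -- a rejected submission for p
      have hsb : (s == "AC") = false := by simpa using hs
      have h1 : ∀ c, hasAC (L ++ [(p, s)]) c = hasAC L c := by
        intro c
        by_cases hc : c = p
        · subst hc; simp [hasAC_append_self, hsb]
        · exact hasAC_append_ne L p c s hc
      have h2 : ∀ c, hasAC L c = true → penOf (L ++ [(p, s)]) c = penOf L c := by
        intro c hAc
        by_cases hc : c = p
        · subst hc; exact penOf_append_of_hasAC L c s hAc
        · exact penOf_append_ne L p c s hc
      obtain ⟨r1, r2⟩ := refs_append_unchanged L p s h1 h2
      have hcntp : cntOf (L ++ [(p, s)]) p = cntOf L p + 1 := by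
        simp [cntOf_append_self, hsb]
      have hcnt_ne : ∀ c, c ≠ p → cntOf (L ++ [(p, s)]) c = cntOf L c := fun c hc =>
        cntOf_append_ne L p c s hc
      by_cases hc0 : cntOf L p = 0
      · have hstep : solveStep (stateA L) p s
            = ((stateA L).1, (stateA L).2.1, (stateA L).2.2.1,
               (stateA L).2.2.2.insert p 1) := by
          simp [solveStep, hsb, hcwd p, hc0]
        rw [hstep]
        refine ⟨by rw [r1, hac], by rw [r2, hwa], fun c => by rw [hcad c, h1 c],
          fun c => ?_, fun c => ?_⟩
        · rw [PySem.Dict.contains_insert]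
          by_cases hc : c = p
          · subst hc; simp [hcntp, hc0]
          · have hb : (c == p) = false := by simpa using hc
            rw [hb, hcwd c, hcnt_ne c hc]
            simp
        · rw [PySem.Dict.getD_insert]
          by_cases hc : c = p
          · subst hc; simp [hcntp, hc0]
          · rw [if_neg hc, hgwd c, hcnt_ne c hc]
      · have hstep : solveStep (stateA L) p s
            = ((stateA L).1, (stateA L).2.1, (stateA L).2.2.1,
               (stateA L).2.2.2.modify p 0 (· + 1)) := by
          simp [solveStep, hsb, hcwd p, hc0]
        rw [hstep]
        refine ⟨by rw [r1, hac], by rw [r2, hwa], fun c => by rw [hcad c, h1 c],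
          fun c => ?_, fun c => ?_⟩
        · rw [PySem.Dict.contains_modify]
          by_cases hc : c = p
          · subst hc
            have := cntOf_nonneg L c
            simp only [hcntp]
            have hne : cntOf L c + 1 ≠ 0 := by omega
            simp [hne]
          · have hb : (c == p) = false := by simpa using hc
            rw [hb, hcwd c, hcnt_ne c hc]
            simp
        · rw [PySem.Dict.getD_modify]
          by_cases hc : c = p
          · subst hc; rw [if_pos rfl, hgwd c, hcntp]
          · rw [if_neg hc, hgwd c, hcnt_ne c hc]

-- the B-side: the grouped dict evaluates to the same reference quantities
lemma pair_fold (ks : List Int) (F : Int → Bool) (G : Int → Int) (a b : Int) :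
    ks.foldl (fun (r : Int × Int) c => if F c then (r.1 + 1, r.2 + G c) else r) (a, b)
      = (a + (ks.map (fun c => if F c then (1 : Int) else 0)).sum,
         b + (ks.map (fun c => if F c then G c else 0)).sum) := by
  induction ks generalizing a b with
  | nil => simp
  | cons k t ih => cases hF : F k <;> simp [hF, ih] <;> ring_nf <;> simp

lemma B_eval (L : List (Int × String)) :
    ((L.foldl (fun (d : PySem.Dict Int (List String)) pr => d.modify pr.1 [] (· ++ [pr.2]))
        PySem.Dict.empty).values.foldl
      (fun (r : Int × Int) sts =>
        if sts.contains "AC" then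
          (r.1 + 1, r.2 + (((PySem.List.index? sts "AC").getD 0 : Nat) : Int))
        else r) (0, 0)) = (refAC L, refWA L) := by
  set d := L.foldl (fun (d : PySem.Dict Int (List String)) pr => d.modify pr.1 [] (· ++ [pr.2]))
        PySem.Dict.empty with hd
  have hnd : d.keys.Nodup := by
    rw [hd]; apply PySem.Dict.nodup_keys_foldl_modify_key; simp
  have hkeys : d.keys = keysOf L := by
    rw [hd, PySem.Dict.keys_foldl_modify_key]
    simp [PySem.Set.update, keysOf, PySem.Set.ofList_eq_foldl]
  have hget : ∀ c, d.getD c [] = statOf L c := fun c => by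
    rw [hd, PySem.Dict.getD_foldl_modify_append]; simp [statOf]
  rw [PySem.Dict.values_eq_map_keys d hnd []]
  rw [List.map_congr_left (fun c _ => hget c), hkeys, List.foldl_map]
  rw [pair_fold (keysOf L) (fun c => (statOf L c).contains "AC")
    (fun c => (((PySem.List.index? (statOf L c) "AC").getD 0 : Nat) : Int))]
  simp [refAC, refWA, hasAC, penOf]

-- index loops over both lists at once become a fold over the zipped prefixes
lemma foldl_range_eq_zip {σ : Type} (g : σ → Int → String → σ) (p_list : List Int)
    (s_list : List String) (k : Nat) (hp : k ≤ p_list.length) (hs : k ≤ s_list.length)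
    (init : σ) :
    (PySem.List.pyRange 0 (k : Int) 1).foldl
        (fun st i => g st (PySem.List.pyGetD p_list i 0) (PySem.List.pyGetD s_list i "")) init
      = ((p_list.take k).zip (s_list.take k)).foldl (fun st pr => g st pr.1 pr.2) init := by
  induction k with
  | zero => simp [PySem.List.pyRange_one_eq_nil]
  | succ k ih =>
    rw [show ((k + 1 : Nat) : Int) = (k : Int) + 1 by push_cast; ring,
      PySem.List.pyRange_one_succ_right (by positivity), List.foldl_append,
      ih (by omega) (by omega)]
    have hpk : k < p_list.length := by omega
    have hsk : k < s_list.length := by omega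
    rw [List.take_add_one, List.take_add_one, List.getElem?_eq_getElem hpk,
      List.getElem?_eq_getElem hsk]
    rw [List.zip_append (by simp [List.length_take]; omega), List.foldl_append]
    simp [PySem.List.pyGetD_natCast, List.getD_eq_getElem?_getD, hpk, hsk]

theorem solve_spec : Claim_equal_solve := by
  intro n m p_list s_list _ hpre
  obtain ⟨hp, hs⟩ := hpre
  show solve n m p_list s_list = solve_alt n m p_list s_list
  simp only [solve, solve_alt]
  by_cases hm : m ≤ 0
  · rw [PySem.List.pyRange_one_eq_nil hm]
    rfl
  · have hk : m = ((m.toNat : Nat) : Int) := (Int.toNat_of_nonneg (by omega)).symm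
    rw [hk,
      foldl_range_eq_zip solveStep p_list s_list m.toNat (by omega) (by omega),
      foldl_range_eq_zip
        (fun (d : PySem.Dict Int (List String)) p s => d.modify p [] (· ++ [s]))
        p_list s_list m.toNat (by omega) (by omega)]
    set L := (p_list.take m.toNat).zip (s_list.take m.toNat) with hL
    obtain ⟨h1, h2, -, -, -⟩ := A_fold_inv L
    have hb := B_eval L
    rw [hb]
    have e1 : (L.foldl (fun st pr => solveStep st pr.1 pr.2)
        ((0 : Int), (0 : Int), (PySem.Dict.empty : PySem.Dict Int Int),
          (PySem.Dict.empty : PySem.Dict Int Int))).1 = refAC L := h1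
    have e2 : (L.foldl (fun st pr => solveStep st pr.1 pr.2)
        ((0 : Int), (0 : Int), (PySem.Dict.empty : PySem.Dict Int Int),
          (PySem.Dict.empty : PySem.Dict Int Int))).2.1 = refWA L := h2
    rw [e1, e2]
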